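-- pv_equiv track=rewrite | github.com/carolinalimaal/Prog-I-Hidaka | Lista1_Prog1/C8.py | calcular_conceitos_de_notas
-- ===== SOURCE A (Python) =====
-- def calcular_conceitos_de_notas(lista_conceitos):
--     """
--     Calcula quantos alunos possuem cada conceito (E, B, R e I).
--     Argumento:
--         lista_conceitos: Uma lista contendo os conceitos de cada aluno, expresso em string caixa alta
--     Saída:
--         dicionario_conceitos: Um dicionário contendo a quantidade de alunos que cada conceito possue.
--     """
--     dicionario_conceitos = {'E': 0,
--                             'B': 0,
--                             'R': 0,
--                             'I': 0}
--
--     for conceito in lista_conceitos: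
--         for key in dicionario_conceitos:
--             if conceito == key:
--                 dicionario_conceitos[key] += 1
--     return dicionario_conceitos
-- ===== SOURCE B (Python) =====
-- def calcular_conceitos_de_notas(lista_conceitos):
--     resultado = {'E': 0, 'B': 0, 'R': 0, 'I': 0}
--     restante = sorted(lista_conceitos)
--     while restante:
--         cabeca = restante[0]
--         tamanho = 1
--         while tamanho < len(restante) and restante[tamanho] == cabeca:
--             tamanho += 1
--         if cabeca in resultado:
--             resultado[cabeca] = tamanho
--         restante = restante[tamanho:]
--     return resultado
-- ===== Notes on version B (the rewrite author's own statement) =====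
-- stated objective: alternative
-- what changed: Replaces A's per-element tally (inner loop over the dict's keys incrementing on match) by sort-then-group: sort the list once, scan it run by run, and record each run's length for the runs whose head is one of the four concept keys.
import Mathlib
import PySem

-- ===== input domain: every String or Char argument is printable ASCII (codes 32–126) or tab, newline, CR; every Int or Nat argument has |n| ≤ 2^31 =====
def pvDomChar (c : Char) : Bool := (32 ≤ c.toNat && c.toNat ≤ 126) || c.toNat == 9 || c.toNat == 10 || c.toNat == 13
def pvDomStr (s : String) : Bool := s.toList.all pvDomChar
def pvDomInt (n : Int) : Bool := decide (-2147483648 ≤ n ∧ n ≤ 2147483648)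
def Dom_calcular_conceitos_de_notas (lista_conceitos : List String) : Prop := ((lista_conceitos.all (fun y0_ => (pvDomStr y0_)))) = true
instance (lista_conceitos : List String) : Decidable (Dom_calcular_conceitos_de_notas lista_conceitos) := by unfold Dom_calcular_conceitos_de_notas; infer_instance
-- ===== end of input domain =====

-- B replaces A's per-element tally (inner key loop) by sort-then-group: sort once,
-- scan run by run, record the run lengths of the four concept keys (alternative algorithm).


-- ===== PORT A =====
-- dicionario_conceitos starts with the four keys; for each conceito the inner loop
-- walks the dict's keys and increments (dicionario[key] += 1) on the matching key.
def calcular_conceitos_de_notas (lista_conceitos : List String) : List (String × Int) :=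
  (lista_conceitos.foldl
    (fun d conceito =>
      d.keys.foldl
        (fun d' key => if conceito == key then d'.modify key 0 (· + 1) else d') d)
    (PySem.Dict.ofList [("E", 0), ("B", 0), ("R", 0), ("I", 0)])).items

-- ===== PORT B =====
-- the inner 'while tamanho < len(restante) and restante[tamanho] == cabeca: tamanho += 1'
-- counts, on the tail, the prefix equal to cabeca (tamanho = 1 + this run length)
def pvRunLen (x : String) : List String → Nat
  | [] => 0
  | y :: ys => if y == x then 1 + pvRunLen x ys else 0

-- the outer while loop: take the run at the head of restante, record its length if the
-- head is a key of resultado, and continue on restante[tamanho:]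
def pvGroupLoop (restante : List String) (resultado : PySem.Dict String Int) :
    PySem.Dict String Int :=
  match restante with
  | [] => resultado
  | cabeca :: resto =>
    let tamanho := 1 + pvRunLen cabeca resto
    let resultado' := if resultado.contains cabeca
      then resultado.insert cabeca (tamanho : Int) else resultado
    pvGroupLoop (resto.drop (pvRunLen cabeca resto)) resultado'
termination_by restante.length
decreasing_by
  simp only [List.length_drop, List.length_cons]
  omega

def calcular_conceitos_de_notas_alt (lista_conceitos : List String) : List (String × Int) :=
  (pvGroupLoop (PySem.List.sorted lista_conceitos (fun x => x) false)
    (PySem.Dict.ofList [("E", 0), ("B", 0), ("R", 0), ("I", 0)])).items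

-- ===== PRECONDITION & SPEC =====
def Spec_calcular_conceitos_de_notas (lista_conceitos : List String) (out : List (String × Int)) : Prop := out = calcular_conceitos_de_notas_alt lista_conceitos
instance (lista_conceitos : List String) (out : List (String × Int)) : Decidable (Spec_calcular_conceitos_de_notas lista_conceitos out) := by unfold Spec_calcular_conceitos_de_notas; infer_instance

-- ===== CLAIM (what is proved, stated in full; the proofs are below) =====
def Claim_equal_calcular_conceitos_de_notas : Prop := ∀ (lista_conceitos : List String), Dom_calcular_conceitos_de_notas lista_conceitos → Spec_calcular_conceitos_de_notas lista_conceitos (calcular_conceitos_de_notas lista_conceitos)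

-- ===== LEMMAS AND PROOFS =====

-- ---- A side (as in a single-pass tally): A's result is the four keys mapped to counts ----

theorem pv_inner_not_mem {x : String} {ks : List String} (hx : x ∉ ks)
    (d : PySem.Dict String Int) :
    ks.foldl (fun d' key => if x == key then d'.modify key 0 (· + 1) else d') d = d := by
  induction ks generalizing d with
  | nil => rfl
  | cons k ks ih =>
    have hxk : x ≠ k := fun h => hx (h ▸ List.mem_cons_self)
    rw [List.foldl_cons, if_neg (by simp [hxk])]
    exact ih (fun h => hx (List.mem_cons_of_mem _ h)) d

theorem pv_inner_mem {x : String} {ks : List String} (hx : x ∈ ks) (hnd : ks.Nodup)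
    (d : PySem.Dict String Int) :
    ks.foldl (fun d' key => if x == key then d'.modify key 0 (· + 1) else d') d =
      d.modify x 0 (· + 1) := by
  induction ks generalizing d with
  | nil => exact absurd hx (List.not_mem_nil)
  | cons k ks ih =>
    rcases List.mem_cons.mp hx with hxk | hxks
    · subst hxk
      rw [List.foldl_cons, if_pos (by simp)]
      exact pv_inner_not_mem (List.nodup_cons.mp hnd).1 _
    · have hxk : x ≠ k := fun h => (List.nodup_cons.mp hnd).1 (h ▸ hxks)
      rw [List.foldl_cons, if_neg (by simp [hxk])]
      exact ih hxks (List.nodup_cons.mp hnd).2 d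

theorem pv_outer (l : List String) (d : PySem.Dict String Int) (hnd : d.keys.Nodup) :
    (l.foldl
        (fun d conceito =>
          d.keys.foldl
            (fun d' key => if conceito == key then d'.modify key 0 (· + 1) else d') d)
        d).keys = d.keys ∧
    ∀ k ∈ d.keys,
      (l.foldl
          (fun d conceito =>
            d.keys.foldl
              (fun d' key => if conceito == key then d'.modify key 0 (· + 1) else d') d)
          d).getD k 0 = d.getD k 0 + l.count k := by
  induction l generalizing d with
  | nil => exact ⟨rfl, by simp⟩
  | cons x l ih =>
    by_cases hx : x ∈ d.keys
    · have hstep : d.keys.foldl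
          (fun d' key => if x == key then d'.modify key 0 (· + 1) else d') d =
          d.modify x 0 (· + 1) := pv_inner_mem hx hnd d
      have hkeys : (d.modify x 0 (· + 1)).keys = d.keys := by
        rw [PySem.Dict.keys_modify]
        exact PySem.Dict.keys_insert_of_contains _ _
          ((PySem.Dict.contains_iff_mem_keys _ _).mpr hx)
      obtain ⟨ihk, ihv⟩ := ih (d.modify x 0 (· + 1)) (hkeys ▸ hnd)
      rw [List.foldl_cons, hstep]
      refine ⟨ihk.trans hkeys, fun k hk => ?_⟩
      rw [ihv k (hkeys ▸ hk), PySem.Dict.getD_modify, List.count_cons]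
      by_cases hkx : k = x
      · rw [if_pos hkx, hkx, if_pos (by simp)]
        push_cast
        ring
      · rw [if_neg hkx, if_neg (by simp [Ne.symm hkx])]
        simp
    · have hstep : d.keys.foldl
          (fun d' key => if x == key then d'.modify key 0 (· + 1) else d') d = d :=
        pv_inner_not_mem hx d
      obtain ⟨ihk, ihv⟩ := ih d hnd
      rw [List.foldl_cons, hstep]
      refine ⟨ihk, fun k hk => ?_⟩
      have hkx : x ≠ k := fun h => hx (h ▸ hk)
      rw [ihv k hk, List.count_cons, if_neg (by simp [hkx])]
      simp

-- ---- B side: the run at the head of a sorted list is exactly the count of its head ----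

-- the prefix counted by pvRunLen is a run of x, and what follows starts with a non-x
theorem pvRunLen_take_drop (x : String) (xs : List String) :
    xs.take (pvRunLen x xs) = List.replicate (pvRunLen x xs) x ∧
    ∀ y ∈ (xs.drop (pvRunLen x xs)).head?, y ≠ x := by
  induction xs with
  | nil => simp [pvRunLen]
  | cons y ys ih =>
    by_cases h : y = x
    · subst h
      have hr : pvRunLen y (y :: ys) = pvRunLen y ys + 1 := by
        simp [pvRunLen, Nat.add_comm]
      rw [hr]
      simp only [List.take_succ_cons, List.replicate_succ, List.drop_succ_cons]
      exact ⟨by rw [ih.1], ih.2⟩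
    · simp [pvRunLen, h]

theorem pv_sorted_count_head {x : String} {xs : List String}
    (hs : (x :: xs).Pairwise (· ≤ ·)) :
    ((xs.drop (pvRunLen x xs)).count x = 0) ∧
    (x :: xs).count x = 1 + pvRunLen x xs ∧
    ∀ k, k ≠ x → (x :: xs).count k = (xs.drop (pvRunLen x xs)).count k := by
  obtain ⟨htake, hhead⟩ := pvRunLen_take_drop x xs
  have hxall : ∀ y ∈ xs, x ≤ y := fun y hy => (List.pairwise_cons.mp hs).1 y hy
  have hxs : xs.Pairwise (· ≤ ·) := (List.pairwise_cons.mp hs).2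
  have hdropsub : (xs.drop (pvRunLen x xs)).Sublist xs := List.drop_sublist _ _
  have hnotmem : x ∉ xs.drop (pvRunLen x xs) := by
    intro hmem
    cases hd : xs.drop (pvRunLen x xs) with
    | nil => rw [hd] at hmem; exact List.not_mem_nil hmem
    | cons h t =>
      have hhx : h ≠ x := hhead h (by rw [hd]; rfl)
      have hht : (h :: t).Pairwise (· ≤ ·) := hd ▸ hxs.sublist hdropsub
      rw [hd] at hmem
      rcases List.mem_cons.mp hmem with h1 | h1
      · exact hhx h1.symm
      · have h2 : h ≤ x := (List.pairwise_cons.mp hht).1 x h1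
        have h3 : x ≤ h := hxall h (hdropsub.mem (hd ▸ List.mem_cons_self))
        exact hhx (le_antisymm h2 h3)
  have hsplit : xs = xs.take (pvRunLen x xs) ++ xs.drop (pvRunLen x xs) :=
    (List.take_append_drop _ _).symm
  refine ⟨List.count_eq_zero.mpr hnotmem, ?_, ?_⟩
  · rw [List.count_cons_self]
    conv_lhs => rw [hsplit]
    rw [List.count_append, htake, List.count_replicate_self,
      List.count_eq_zero.mpr hnotmem]
    omega
  · intro k hk
    rw [List.count_cons, if_neg (by simp [Ne.symm hk])]
    conv_lhs => rw [hsplit]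
    rw [List.count_append, htake, List.count_replicate, if_neg (by simp [Ne.symm hk])]
    omega

-- the grouping loop on a sorted list: keys unchanged; each key present ends at its count
theorem pv_group_aux (n : Nat) : ∀ (s : List String), s.length ≤ n →
    ∀ d : PySem.Dict String Int, s.Pairwise (· ≤ ·) →
    (pvGroupLoop s d).keys = d.keys ∧
    ∀ k ∈ d.keys,
      (pvGroupLoop s d).getD k 0 =
        if s.count k = 0 then d.getD k 0 else (s.count k : Int) := by
  induction n with
  | zero =>
    intro s hlen d _
    have hnil : s = [] := List.length_eq_zero_iff.mp (Nat.le_zero.mp hlen)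
    subst hnil
    simp [pvGroupLoop]
  | succ n ihn =>
    intro s hlen d hs
    match s with
    | [] => simp [pvGroupLoop]
    | x :: xs =>
      obtain ⟨h0, h1, h2⟩ := pv_sorted_count_head hs
      have hxs : (xs.drop (pvRunLen x xs)).Pairwise (· ≤ ·) :=
        ((List.pairwise_cons.mp hs).2).sublist (List.drop_sublist _ _)
      have hlen' : (xs.drop (pvRunLen x xs)).length ≤ n := by
        simp only [List.length_cons] at hlen
        simp only [List.length_drop]
        omega
      rw [pvGroupLoop]
      set d' : PySem.Dict String Int :=
        if d.contains x = true then d.insert x ((1 + pvRunLen x xs : Nat) : Int) else d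
        with hd'
      have hkeys' : d'.keys = d.keys := by
        rw [hd']
        split
        · exact PySem.Dict.keys_insert_of_contains _ _ (by assumption)
        · rfl
      obtain ⟨ihk, ihv⟩ := ihn _ hlen' d' hxs
      refine ⟨ihk.trans hkeys', fun k hk => ?_⟩
      rw [ihv k (hkeys' ▸ hk)]
      by_cases hkx : k = x
      · subst hkx
        rw [h0]
        simp only [if_pos]
        have hc : d.contains k = true := (PySem.Dict.contains_iff_mem_keys _ _).mpr hk
        have hne : (k :: xs).count k ≠ 0 := by rw [h1]; omega
        rw [if_neg hne, h1, hd', if_pos hc, PySem.Dict.getD_insert]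
        simp
      · rw [← h2 k hkx]
        have hd'k : d'.getD k 0 = d.getD k 0 := by
          rw [hd']
          split
          · rw [PySem.Dict.getD_insert, if_neg hkx]
          · rfl
        rw [hd'k]

theorem pv_group (s : List String) (d : PySem.Dict String Int)
    (hs : s.Pairwise (· ≤ ·)) :
    (pvGroupLoop s d).keys = d.keys ∧
    ∀ k ∈ d.keys,
      (pvGroupLoop s d).getD k 0 =
        if s.count k = 0 then d.getD k 0 else (s.count k : Int) :=
  pv_group_aux s.length s le_rfl d hs

-- ===== VERDICT (by name: the statement is the Claim_ definition above) =====
theorem calcular_conceitos_de_notas_spec : Claim_equal_calcular_conceitos_de_notas := by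
  intro l _
  show calcular_conceitos_de_notas l = calcular_conceitos_de_notas_alt l
  unfold calcular_conceitos_de_notas calcular_conceitos_de_notas_alt
  have hd0 : (PySem.Dict.ofList [("E", (0:Int)), ("B", 0), ("R", 0), ("I", 0)] :
      PySem.Dict String Int) = PySem.Dict.mk [("E", 0), ("B", 0), ("R", 0), ("I", 0)] := by
    decide
  rw [hd0]
  set d0 : PySem.Dict String Int := PySem.Dict.mk [("E", 0), ("B", 0), ("R", 0), ("I", 0)]
    with hd0def
  have hnd : d0.keys.Nodup := by rw [hd0def]; decide
  obtain ⟨hak, hav⟩ := pv_outer l d0 hnd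
  have hsorted : (PySem.List.sorted l (fun x => x) false).Pairwise (· ≤ ·) :=
    PySem.List.sorted_pairwise l (fun x => x)
  obtain ⟨hbk, hbv⟩ := pv_group (PySem.List.sorted l (fun x => x) false) d0 hsorted
  have hperm : (PySem.List.sorted l (fun x => x) false).Perm l :=
    PySem.List.sorted_perm l (fun x => x) false
  rw [PySem.Dict.items_eq_map_keys _ (hak ▸ hnd) 0,
    PySem.Dict.items_eq_map_keys _ (hbk ▸ hnd) 0, hak, hbk]
  apply List.map_congr_left
  intro k hk
  rw [hav k hk, hbv k hk, hperm.count_eq]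
  have hz : d0.getD k 0 = 0 := by
    rw [hd0def]
    fin_cases hk <;> decide
  rw [hz]
  by_cases h : l.count k = 0
  · rw [if_pos h, h]
    simp
  · rw [if_neg h]
    simp
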